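-- pv_equiv track=rewrite | github.com/korasrar/Work | R101/TP10/pokedex/pokedex.py | attaque_preferee_v3
-- ===== SOURCE A (Python) =====
-- def attaque_preferee_v3(pokedex):
--     """
--     Renvoie le nom du type d'attaque qui est la plus fréquente dans le pokedex
--     """
--     attaquemax = ""
--     pokemonmax = 0
--     for attaque,pokemon in pokedex.items():
--         if len(pokemon) > pokemonmax:
--             pokemonmax = len(pokemon)
--             attaquemax = attaque
--     return attaquemax
-- ===== SOURCE B (Python) =====
-- def attaque_preferee_v3(pokedex):
--     """
--     Renvoie le nom du type d'attaque qui est la plus frequente dans le pokedex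
--     """
--     items = sorted(pokedex.items(), key=lambda kv: len(kv[1]), reverse=True)
--     return items[0][0] if items else ""
-- ===== Notes on version B (the rewrite author's own statement) =====
-- stated objective: alternative
-- what changed: B sorts the items by value-list length descending (stable sort keeps the first-encountered key among ties) and returns the first key, instead of A's running-max loop.
-- intended difference: On a non-empty pokedex whose value lists are all empty (and whose first key is not ""), A's max counter never leaves 0 so it returns the sentinel "", while B returns the first key, the natural 'most frequent' answer when all counts tie at zero. — e.g. on attaque_preferee_v3([("a", [])]): A returns "", B returns "a"
import Mathlib
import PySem

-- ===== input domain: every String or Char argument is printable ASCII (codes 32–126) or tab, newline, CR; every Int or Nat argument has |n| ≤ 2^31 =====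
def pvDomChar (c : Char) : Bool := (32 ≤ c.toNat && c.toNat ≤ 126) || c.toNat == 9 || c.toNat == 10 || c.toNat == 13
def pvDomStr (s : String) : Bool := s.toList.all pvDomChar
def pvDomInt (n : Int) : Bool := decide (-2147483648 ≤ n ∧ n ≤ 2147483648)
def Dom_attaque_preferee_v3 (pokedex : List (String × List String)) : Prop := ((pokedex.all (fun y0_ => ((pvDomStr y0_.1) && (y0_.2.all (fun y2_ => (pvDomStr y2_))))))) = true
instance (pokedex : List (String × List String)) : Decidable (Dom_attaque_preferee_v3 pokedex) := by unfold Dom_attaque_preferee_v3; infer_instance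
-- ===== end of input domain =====

-- B sorts the items by value-list length, descending and stable, and takes the first key; same result as A's running-max loop except on the all-empty corner stated at D_.

-- ===== PORT A =====
-- A: forward loop, state (attaquemax, pokemonmax), update on strict >
def pvStepA (acc : String × Nat) (kv : String × List String) : String × Nat :=
  if kv.2.length > acc.2 then (kv.1, kv.2.length) else acc

def attaque_preferee_v3 (pokedex : List (String × List String)) : String :=
  (pokedex.foldl pvStepA ("", 0)).1

-- ===== PORT B =====
-- B: items = sorted(pokedex.items(), key=lambda kv: len(kv[1]), reverse=True); return items[0][0] if items else ""
def attaque_preferee_v3_alt (pokedex : List (String × List String)) : String :=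
  match PySem.List.sorted pokedex (fun kv => kv.2.length) true with
  | [] => ""
  | kv :: _ => kv.1

-- ===== PRECONDITION & SPEC =====
-- On a non-empty pokedex whose value lists are all empty (and whose first key is not ""),
-- A's max counter never leaves 0 so it returns the sentinel "", while B returns the first key,
-- the natural 'most frequent' answer when all counts tie at zero.
def D_attaque_preferee_v3 (pokedex : List (String × List String)) : Prop :=
  pokedex ≠ [] ∧ (∀ kv ∈ pokedex, kv.2 = []) ∧ pokedex.headI.1 ≠ ""
instance (pokedex : List (String × List String)) : Decidable (D_attaque_preferee_v3 pokedex) := by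
  unfold D_attaque_preferee_v3; infer_instance

def Spec_attaque_preferee_v3 (pokedex : List (String × List String)) (out : String) : Prop :=
  ¬ D_attaque_preferee_v3 pokedex → out = attaque_preferee_v3_alt pokedex
instance (pokedex : List (String × List String)) (out : String) : Decidable (Spec_attaque_preferee_v3 pokedex out) := by
  unfold Spec_attaque_preferee_v3; infer_instance

def pvDiffWitness_attaque_preferee_v3 : (List (String × List String)) := [("a", [])]
def pvDiffWitnessOut_attaque_preferee_v3 : String × String := ("", "a")

-- ===== CLAIM =====
def Claim_unchanged_attaque_preferee_v3 : Prop := ∀ (pokedex : List (String × List String)), Dom_attaque_preferee_v3 pokedex → Spec_attaque_preferee_v3 pokedex (attaque_preferee_v3 pokedex)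
def Claim_changed_attaque_preferee_v3 : Prop := Dom_attaque_preferee_v3 (pvDiffWitness_attaque_preferee_v3) ∧ D_attaque_preferee_v3 (pvDiffWitness_attaque_preferee_v3) ∧ attaque_preferee_v3 (pvDiffWitness_attaque_preferee_v3) = pvDiffWitnessOut_attaque_preferee_v3.1 ∧ attaque_preferee_v3_alt (pvDiffWitness_attaque_preferee_v3) = pvDiffWitnessOut_attaque_preferee_v3.2 ∧ pvDiffWitnessOut_attaque_preferee_v3.1 ≠ pvDiffWitnessOut_attaque_preferee_v3.2
def Claim_exact_attaque_preferee_v3 : Prop := ∀ (pokedex : List (String × List String)), Dom_attaque_preferee_v3 pokedex → D_attaque_preferee_v3 pokedex → attaque_preferee_v3 pokedex ≠ attaque_preferee_v3_alt pokedex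

-- ===== LEMMAS AND PROOFS =====

-- the comparison B's reverse-stable insertion sort uses
def pvBef (p q : String × List String) : Bool := decide (q.2.length < p.2.length)

-- the head of the insertion-sort fold carries exactly A's running-max state
theorem pvHead_ins_fold (xs : List (String × List String)) :
    ∀ (a : String × List String) (acc : List (String × List String)),
      ∃ hd t, xs.foldl (fun acc x => PySem.List.insertBy pvBef x acc) (a :: acc) = hd :: t ∧
        (hd.1, hd.2.length) = xs.foldl pvStepA (a.1, a.2.length) := by
  induction xs with
  | nil => intro a acc; exact ⟨a, acc, rfl, rfl⟩
  | cons x xs ih =>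
    intro a acc
    by_cases h : a.2.length < x.2.length
    · obtain ⟨hd, t, heq, hk⟩ := ih x (a :: acc)
      refine ⟨hd, t, ?_, ?_⟩
      · simpa [PySem.List.insertBy, pvBef, h] using heq
      · rw [hk]; simp [List.foldl_cons, pvStepA, h]
    · obtain ⟨hd, t, heq, hk⟩ := ih a (PySem.List.insertBy pvBef x acc)
      refine ⟨hd, t, ?_, ?_⟩
      · simpa [PySem.List.insertBy, pvBef, h] using heq
      · rw [hk]
        have : ¬ x.2.length > a.2.length := by omega
        simp [List.foldl_cons, pvStepA, this]

-- the running max never decreases and dominates every processed element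
theorem pvFoldA_snd_ge (xs : List (String × List String)) :
    ∀ (s : String × Nat), s.2 ≤ (xs.foldl pvStepA s).2 ∧
      ∀ e ∈ xs, e.2.length ≤ (xs.foldl pvStepA s).2 := by
  induction xs with
  | nil => intro s; exact ⟨le_refl _, by simp⟩
  | cons x xs ih =>
    intro s
    rw [List.foldl_cons]
    obtain ⟨h1, h2⟩ := ih (pvStepA s x)
    have hstep : s.2 ≤ (pvStepA s x).2 ∧ x.2.length ≤ (pvStepA s x).2 := by
      unfold pvStepA; split_ifs <;> simp <;> omega
    refine ⟨le_trans hstep.1 h1, ?_⟩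
    intro e he
    rcases List.mem_cons.mp he with rfl | he
    · exact le_trans hstep.2 h1
    · exact h2 e he

-- when every value list is empty the loop state never changes
theorem pvFoldA_id (xs : List (String × List String)) :
    ∀ (k : String), (∀ kv ∈ xs, kv.2 = []) → xs.foldl pvStepA (k, 0) = (k, 0) := by
  induction xs with
  | nil => intro k _; rfl
  | cons x xs ih =>
    intro k h
    have hx : x.2 = [] := h x (List.mem_cons_self ..)
    rw [List.foldl_cons]
    have : pvStepA (k, 0) x = (k, 0) := by simp [pvStepA, hx]
    rw [this]
    exact ih k (fun kv hkv => h kv (List.mem_cons_of_mem _ hkv))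

-- starting from max 0, the key component matters only if the loop never fires
theorem pvFoldA_indep (xs : List (String × List String)) :
    ∀ (k k' : String),
      (xs.foldl pvStepA (k, 0) = (k, 0) ∧ xs.foldl pvStepA (k', 0) = (k', 0)) ∨
      xs.foldl pvStepA (k, 0) = xs.foldl pvStepA (k', 0) := by
  induction xs with
  | nil => intro k k'; left; exact ⟨rfl, rfl⟩
  | cons x xs ih =>
    intro k k'
    by_cases h : x.2.length > 0
    · right
      simp only [List.foldl_cons]
      have hk : pvStepA (k, 0) x = (x.1, x.2.length) := by simp [pvStepA, h]
      have hk' : pvStepA (k', 0) x = (x.1, x.2.length) := by simp [pvStepA, h]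
      rw [hk, hk']
    · have hx : pvStepA (k, 0) x = (k, 0) := by simp [pvStepA, h]
      have hx' : pvStepA (k', 0) x = (k', 0) := by simp [pvStepA, h]
      simp only [List.foldl_cons, hx, hx']
      exact ih k k'

-- B's sorted head, via the fold form of the sort
theorem pvAlt_cons (x : String × List String) (rest : List (String × List String)) :
    ∃ hd t, PySem.List.sorted (x :: rest) (fun kv => kv.2.length) true = hd :: t ∧
      (hd.1, hd.2.length) = rest.foldl pvStepA (x.1, x.2.length) := by
  rw [PySem.List.sorted_rev_eq_foldl_insertBy]
  have h0 : PySem.List.insertBy pvBef x [] = [x] := rfl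
  obtain ⟨hd, t, heq, hk⟩ := pvHead_ins_fold rest x []
  exact ⟨hd, t, by rw [List.foldl_cons]; exact heq, hk⟩

-- ===== VERDICT =====
theorem attaque_preferee_v3_spec : Claim_unchanged_attaque_preferee_v3 := by
  intro l _
  unfold Spec_attaque_preferee_v3
  intro hnD
  cases l with
  | nil => rfl
  | cons x rest =>
    obtain ⟨hd, t, heq, hk⟩ := pvAlt_cons x rest
    have hB : attaque_preferee_v3_alt (x :: rest) = hd.1 := by
      unfold attaque_preferee_v3_alt; rw [heq]
    rw [hB]
    unfold attaque_preferee_v3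
    rw [List.foldl_cons]
    by_cases hx : x.2.length > 0
    · have : pvStepA ("", 0) x = (x.1, x.2.length) := by simp [pvStepA, hx]
      rw [this, ← hk]
    · have hx0 : x.2.length = 0 := by omega
      have hxnil : x.2 = [] := List.length_eq_zero_iff.mp hx0
      have : pvStepA ("", 0) x = ("", 0) := by simp [pvStepA, hx]
      rw [this]
      have hk' : (hd.1, hd.2.length) = rest.foldl pvStepA (x.1, 0) := by rw [hk, hx0]
      rcases pvFoldA_indep rest "" x.1 with ⟨he, he'⟩ | he
      · -- the loop never fires: A returns "", B returns x.1; outside D_ they coincide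
        rw [he]
        have hBhd : hd.1 = x.1 := by
          have h2 := hk'.trans he'
          injection h2 with h1 _
        by_cases hall : ∀ kv ∈ x :: rest, kv.2 = []
        · -- then D_ forces x.1 = ""
          have hx1 : x.1 = "" := by
            by_contra hne
            exact hnD ⟨List.cons_ne_nil _ _, hall, by simpa using hne⟩
          rw [hBhd, hx1]
        · -- some element is non-empty: contradiction with the loop never firing
          push_neg at hall
          obtain ⟨kv, hmem, hkv⟩ := hall
          have hkvlen : 0 < kv.2.length := List.length_pos_iff.mpr hkv
          have hkvrest : kv ∈ rest := by
            rcases List.mem_cons.mp hmem with rfl | h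
            · exact absurd hxnil hkv
            · exact h
          have hle := (pvFoldA_snd_ge rest ("", 0)).2 kv hkvrest
          rw [he] at hle
          have h0' : kv.2.length ≤ 0 := hle
          omega
      · rw [he, ← hk']

theorem attaque_preferee_v3_changed : Claim_changed_attaque_preferee_v3 := by
  unfold Claim_changed_attaque_preferee_v3; decide

theorem attaque_preferee_v3_tight : Claim_exact_attaque_preferee_v3 := by
  intro l _ hD
  obtain ⟨hne, hall, hhd⟩ := hD
  cases l with
  | nil => exact absurd rfl hne
  | cons x rest =>
    have hxnil : x.2 = [] := hall x (List.mem_cons_self ..)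
    have hA : attaque_preferee_v3 (x :: rest) = "" := by
      unfold attaque_preferee_v3
      rw [List.foldl_cons]
      have : pvStepA ("", 0) x = ("", 0) := by simp [pvStepA, hxnil]
      rw [this, pvFoldA_id rest "" (fun kv hkv => hall kv (List.mem_cons_of_mem _ hkv))]
    obtain ⟨hd, t, heq, hk⟩ := pvAlt_cons x rest
    have hB : attaque_preferee_v3_alt (x :: rest) = hd.1 := by
      unfold attaque_preferee_v3_alt; rw [heq]
    have hk' : (hd.1, hd.2.length) = (x.1, 0) := by
      rw [hk]
      have hx0 : x.2.length = 0 := by rw [hxnil]; rfl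
      rw [hx0, pvFoldA_id rest x.1 (fun kv hkv => hall kv (List.mem_cons_of_mem _ hkv))]
    have hBhd : hd.1 = x.1 := by injection hk' with h1 _
    have hhd' : x.1 ≠ "" := by simpa using hhd
    rw [hA, hB, hBhd]
    exact fun h => hhd' h.symm
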